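-- pv_equiv track=rewrite | github.com/benchsci/vendor_catalog_management | benchsci/vendor_catalog/library_translation/backend/bsproduct/packaging.py | replace_invisible_characters
-- ===== SOURCE A (Python) =====
-- import unicodedata
--
-- def replace_invisible_characters(test_string):
--     """Replaces invisible characters and returns string with invisible
--     characters tagged."""
--     if any(
--         [
--             unicodedata.category(x)[0] in ["C", "Z"] and x != u"\u0020"
--             for x in str(test_string)
--         ]
--     ):
--         # when the character is a control character or a separator other than space, replace it with <INVCHAR>
--         return "".join(
--             [
--                 "<INVCHAR>"
--                 if unicodedata.category(x)[0] in ["C", "Z"] and x != u"\u0020"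
--                 else x
--                 for x in str(test_string)
--             ]
--         )
--
--     return test_string
-- ===== SOURCE B (Python) =====
-- import unicodedata
--
-- def replace_invisible_characters(test_string):
--     """Replaces invisible characters and returns string with invisible
--     characters tagged."""
--     result = []
--     changed = False
--     for x in str(test_string):
--         if unicodedata.category(x)[0] in ("C", "Z") and x != u"\u0020":
--             result.append("<INVCHAR>")
--             changed = True
--         else:
--             result.append(x)
--     if changed:
--         return "".join(result)
--     return test_string
-- ===== Notes on version B (the rewrite author's own statement) =====
-- stated objective: simpler
-- what changed: B merges A's two list-comprehension passes (an any-detection pass, then a full replacement pass) into one loop that builds the result while tracking a changed flag, so the string is scanned once instead of twice.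
import Mathlib
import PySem

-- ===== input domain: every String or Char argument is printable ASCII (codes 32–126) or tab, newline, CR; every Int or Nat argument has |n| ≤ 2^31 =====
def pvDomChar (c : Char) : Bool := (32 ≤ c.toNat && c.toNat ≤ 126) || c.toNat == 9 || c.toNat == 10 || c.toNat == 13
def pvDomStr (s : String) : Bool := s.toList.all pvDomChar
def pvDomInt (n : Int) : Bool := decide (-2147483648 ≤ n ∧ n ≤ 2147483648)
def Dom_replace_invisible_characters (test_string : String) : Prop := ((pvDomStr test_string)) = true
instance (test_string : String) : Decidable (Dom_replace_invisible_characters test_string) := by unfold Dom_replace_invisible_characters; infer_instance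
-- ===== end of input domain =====

-- B merges A's detection pass and replacement pass into one loop with a changed flag (objective: simpler, single pass).

-- ===== PORT A =====
-- unicodedata.category(x)[0] ∈ {C, Z} ∧ x ≠ ' ' : on the printable-ASCII + tab/newline/CR domain
-- this holds exactly for tab (9), newline (10), carriage return (13) — exact on Dom.
def pvIsInv (c : Char) : Bool := c.toNat == 9 || c.toNat == 10 || c.toNat == 13

def pvTag : List Char := "<INVCHAR>".toList

def replace_invisible_characters (test_string : String) : String :=
  if (test_string.toList.map (fun x => pvIsInv x)).any id then
    -- "".join([...]) over the per-character strings
    String.mk ((test_string.toList.map (fun x => if pvIsInv x then pvTag else [x])).flatten)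
  else
    test_string

-- ===== PORT B =====
def pvStep (st : List Char × Bool) (x : Char) : List Char × Bool :=
  if pvIsInv x then (st.1 ++ pvTag, true) else (st.1 ++ [x], st.2)

def replace_invisible_characters_alt (test_string : String) : String :=
  let st := test_string.toList.foldl pvStep ([], false)
  if st.2 then String.mk st.1 else test_string

-- ===== PRECONDITION & SPEC =====
def Spec_replace_invisible_characters (test_string : String) (out : String) : Prop := out = replace_invisible_characters_alt test_string
instance (test_string : String) (out : String) : Decidable (Spec_replace_invisible_characters test_string out) := by unfold Spec_replace_invisible_characters; infer_instance

-- ===== CLAIM (what is proved, stated in full; the proofs are below) =====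
def Claim_equal_replace_invisible_characters : Prop := ∀ (test_string : String), Dom_replace_invisible_characters test_string → Spec_replace_invisible_characters test_string (replace_invisible_characters test_string)

-- ===== LEMMAS AND PROOFS =====
theorem pvStep_foldl (l : List Char) (acc : List Char) (b : Bool) :
    l.foldl pvStep (acc, b) =
      (acc ++ (l.map (fun x => if pvIsInv x then pvTag else [x])).flatten,
       b || l.any pvIsInv) := by
  induction l generalizing acc b with
  | nil => simp
  | cons c t ih =>
    simp only [List.foldl_cons, List.map_cons, List.flatten_cons, List.any_cons, pvStep]
    by_cases h : pvIsInv c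
    · simp [h, ih]
    · simp [h, ih, List.append_assoc]

-- ===== VERDICT (by name: the statement is the Claim_ definition above) =====
theorem replace_invisible_characters_spec : Claim_equal_replace_invisible_characters := by
  intro s _
  unfold Spec_replace_invisible_characters replace_invisible_characters replace_invisible_characters_alt
  rw [pvStep_foldl]
  by_cases h : s.toList.any pvIsInv
  · simp [h, List.any_map]
  · simp [h, List.any_map]
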